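-- pv_equiv track=rewrite | github.com/ProbiusOfficial/Hello-CTFtime | json_to_md.py | process_cn_events
-- ===== SOURCE A (Python) =====
-- def process_cn_events(data):
--     upcoming_events = []
--     now_running_events = []
--     past_events = []
--     for event in data['data']['result']:
--         status = event['status']
--         if status == "即将开始":  # 即将开始
--             upcoming_events.append(event)
--         elif status == "正在进行":  # 正在进行
--             now_running_events.append(event)
--         elif status == "已经结束":  # 已经结束
--             past_events.append(event)
--     return upcoming_events, now_running_events, past_events
-- ===== SOURCE B (Python) =====
-- def process_cn_events(data):
--     results = data['data']['result']
--     upcoming_events = [e for e in results if e['status'] == "即将开始"]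
--     now_running_events = [e for e in results if e['status'] == "正在进行"]
--     past_events = [e for e in results if e['status'] == "已经结束"]
--     return upcoming_events, now_running_events, past_events
-- ===== Notes on version B (the rewrite author's own statement) =====
-- stated objective: idiomatic
-- what changed: Replaces the single-pass three-way accumulator loop with three independent list-comprehension filter scans over data['data']['result'].
import Mathlib
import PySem

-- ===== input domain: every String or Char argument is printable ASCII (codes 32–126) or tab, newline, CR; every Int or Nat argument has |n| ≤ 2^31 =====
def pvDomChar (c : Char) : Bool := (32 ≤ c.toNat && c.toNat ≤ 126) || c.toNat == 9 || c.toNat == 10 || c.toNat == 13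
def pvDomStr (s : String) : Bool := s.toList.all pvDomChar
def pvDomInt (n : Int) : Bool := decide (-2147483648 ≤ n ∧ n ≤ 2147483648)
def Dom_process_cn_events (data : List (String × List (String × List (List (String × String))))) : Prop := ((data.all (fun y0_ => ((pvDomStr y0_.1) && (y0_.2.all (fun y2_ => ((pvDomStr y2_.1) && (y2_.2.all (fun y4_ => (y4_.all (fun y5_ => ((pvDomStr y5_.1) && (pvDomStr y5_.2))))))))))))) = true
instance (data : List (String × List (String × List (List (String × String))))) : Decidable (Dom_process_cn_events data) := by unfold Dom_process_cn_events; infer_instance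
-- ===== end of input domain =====

-- B replaces A's single-pass three-way accumulator loop with three independent
-- list-comprehension filter scans (idiomatic; same result, same O(n) cost).

-- ===== PORT A =====
-- Both ports read data['data']['result'] with first-match association-list lookup;
-- a missing key (Python KeyError) is excluded by Pre_process_cn_events below.
def process_cn_events (data : List (String × List (String × List (List (String × String))))) : (List (List (String × String))) × (List (List (String × String))) × (List (List (String × String))) :=
  ((data.lookup "data").bind (fun d => d.lookup "result")).getD [] |>.foldl
    (fun acc event =>
      let status := (event.lookup "status").getD ""
      if status == "即将开始" then (acc.1 ++ [event], acc.2.1, acc.2.2)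
      else if status == "正在进行" then (acc.1, acc.2.1 ++ [event], acc.2.2)
      else if status == "已经结束" then (acc.1, acc.2.1, acc.2.2 ++ [event])
      else acc)
    ([], [], [])

-- ===== PORT B =====
def process_cn_events_alt (data : List (String × List (String × List (List (String × String))))) : (List (List (String × String))) × (List (List (String × String))) × (List (List (String × String))) :=
  let results := ((data.lookup "data").bind (fun d => d.lookup "result")).getD []
  (results.filter (fun e => (e.lookup "status").getD "" == "即将开始"),
   results.filter (fun e => (e.lookup "status").getD "" == "正在进行"),
   results.filter (fun e => (e.lookup "status").getD "" == "已经结束"))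

-- ===== PRECONDITION & SPEC =====
-- Pre_ excludes exactly the inputs on which Python A raises KeyError: a missing
-- 'data' or 'result' key, or an event without a 'status' key.
def Pre_process_cn_events (data : List (String × List (String × List (List (String × String))))) : Prop :=
  ((data.lookup "data").bind (fun d => d.lookup "result")).isSome = true ∧
  ∀ e ∈ ((data.lookup "data").bind (fun d => d.lookup "result")).getD [],
    (e.lookup "status").isSome = true
instance (data : List (String × List (String × List (List (String × String))))) : Decidable (Pre_process_cn_events data) := by unfold Pre_process_cn_events; infer_instance
def pvWitness_process_cn_events : List (String × List (String × List (List (String × String)))) := [("data", [("result", [[("status", "upcoming")]])])]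

def Spec_process_cn_events (data : List (String × List (String × List (List (String × String))))) (out : (List (List (String × String))) × (List (List (String × String))) × (List (List (String × String)))) : Prop := out = process_cn_events_alt data
instance (data : List (String × List (String × List (List (String × String))))) (out : (List (List (String × String))) × (List (List (String × String))) × (List (List (String × String)))) : Decidable (Spec_process_cn_events data out) := by unfold Spec_process_cn_events; infer_instance

-- ===== CLAIM (what is proved, stated in full; the proofs are below) =====
def Claim_equal_process_cn_events : Prop := ∀ (data : List (String × List (String × List (List (String × String))))), Dom_process_cn_events data → Pre_process_cn_events data → Spec_process_cn_events data (process_cn_events data)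

-- ===== LEMMAS AND PROOFS =====
lemma pv_loop_eq (l : List (List (String × String)))
    (a b c : List (List (String × String))) :
    l.foldl
      (fun acc event =>
        if (event.lookup "status").getD "" = "即将开始" then (acc.1 ++ [event], acc.2.1, acc.2.2)
        else if (event.lookup "status").getD "" = "正在进行" then (acc.1, acc.2.1 ++ [event], acc.2.2)
        else if (event.lookup "status").getD "" = "已经结束" then (acc.1, acc.2.1, acc.2.2 ++ [event])
        else acc)
      (a, b, c) =
    (a ++ l.filter (fun e => (e.lookup "status").getD "" == "即将开始"),
     b ++ l.filter (fun e => (e.lookup "status").getD "" == "正在进行"),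
     c ++ l.filter (fun e => (e.lookup "status").getD "" == "已经结束")) := by
  induction l generalizing a b c with
  | nil => simp
  | cons e t ih =>
    simp only [List.foldl_cons, List.filter_cons]
    by_cases h1 : (e.lookup "status").getD "" = "即将开始"
    · simp [h1, ih]
    · by_cases h2 : (e.lookup "status").getD "" = "正在进行"
      · simp [h2, ih]
      · by_cases h3 : (e.lookup "status").getD "" = "已经结束"
        · simp [h3, ih]
        · simp [h1, h2, h3, ih]

-- ===== VERDICT (by name: the statement is the Claim_ definition above) =====
theorem process_cn_events_spec : Claim_equal_process_cn_events := by
  intro data _ _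
  unfold Spec_process_cn_events process_cn_events process_cn_events_alt
  simpa using pv_loop_eq _ [] [] []
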